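-- pv_equiv track=rewrite | github.com/xjdrew/sample | tap.py | press_key
-- ===== SOURCE A (Python) =====
-- def press_key(remain, total, clip, keylist):
--     if remain == 0:
--         return total, keylist
--
--     t = []
--     if clip == 0:
--         t.append(press_key(remain-1, total+1, clip, keylist+"A"))
--     else:
--         t.append(press_key(remain-1, total + clip, clip, keylist+"v"))
--     if remain >= 4:
--         t.append(press_key(remain-4, 2*total, total, keylist+"acvv"))
--
--     total, keylist = 0, ""
--     for l in t:
--         if l[0] > total:
--             total = l[0]
--             keylist = l[1]
--     return total, keylist
-- ===== SOURCE B (Python) =====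
-- def press_key(remain, total, clip, keylist):
--     if remain == 0:
--         return total, keylist
--
--     # Iterative depth-first search with an explicit stack over all complete
--     # press sequences; keep the best (total, keys) seen, starting from the
--     # empty baseline of zero.
--     best_total, best_keys = 0, ""
--     stack = [(remain, total, clip, keylist)]
--     while stack:
--         r, t, c, k = stack.pop()
--         if r == 0:
--             if t > best_total:
--                 best_total, best_keys = t, k
--             continue
--         # push the double-up branch first so the single-press branch is explored first
--         if r >= 4:
--             stack.append((r - 4, 2 * t, t, k + "acvv"))
--         if c == 0:
--             stack.append((r - 1, t + 1, c, k + "A"))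
--         else:
--             stack.append((r - 1, t + c, c, k + "v"))
--     return best_total, best_keys
-- ===== Notes on version B (the rewrite author's own statement) =====
-- stated objective: alternative
-- what changed: B replaces A's branching recursion (which combines child results with a per-level fold) by an iterative depth-first search with an explicit stack over all complete press sequences, keeping one running best (total, keys); Pre_ excludes remain < 0, on which A recurses past its base case and raises RecursionError.
import Mathlib
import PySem

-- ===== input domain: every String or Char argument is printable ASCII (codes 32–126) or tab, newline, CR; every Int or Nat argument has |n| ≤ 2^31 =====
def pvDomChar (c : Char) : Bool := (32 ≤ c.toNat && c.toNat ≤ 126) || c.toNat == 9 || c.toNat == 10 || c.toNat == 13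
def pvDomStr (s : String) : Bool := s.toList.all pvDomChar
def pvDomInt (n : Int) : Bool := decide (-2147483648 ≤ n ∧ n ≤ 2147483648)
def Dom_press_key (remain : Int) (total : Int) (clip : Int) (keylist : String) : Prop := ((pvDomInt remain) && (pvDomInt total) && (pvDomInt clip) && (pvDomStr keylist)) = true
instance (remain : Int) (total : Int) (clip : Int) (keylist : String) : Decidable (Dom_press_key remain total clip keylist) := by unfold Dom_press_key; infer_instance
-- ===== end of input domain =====

-- B replaces A's branching recursion by an iterative explicit-stack DFS over all
-- complete press sequences, keeping one running best pair (alternative decomposition,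
-- same exponential search).

-- ===== PORT A =====
-- fuel = remain.toNat makes A's recursion structural; for 0 ≤ remain it never runs out
def press_key_go (fuel : Nat) (remain : Int) (total : Int) (clip : Int) (keylist : String) : Int × String :=
  if remain == 0 then (total, keylist)
  else
    match fuel with
    | 0 => (0, "")   -- unreachable when remain.toNat ≤ fuel and 0 ≤ remain
    | n+1 =>
      let t : List (Int × String) :=
        (if clip == 0 then [press_key_go n (remain-1) (total+1) clip (keylist ++ "A")]
         else [press_key_go n (remain-1) (total+clip) clip (keylist ++ "v")]) ++
        (if 4 ≤ remain then [press_key_go n (remain-4) (2*total) total (keylist ++ "acvv")] else [])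
      t.foldl (fun acc l => if l.1 > acc.1 then l else acc) ((0 : Int), "")

def press_key (remain : Int) (total : Int) (clip : Int) (keylist : String) : Int × String :=
  press_key_go remain.toNat remain total clip keylist

-- ===== PORT B =====
-- Source B's while-loop over the explicit stack; list head = top of the Python stack
-- (Python pushes the acvv branch before the single-press branch, so the single-press
-- entry is consed last and popped first, exactly as list.pop() does).
-- fuel bounds the number of pops; for 0 < remain, 3 ^ remain.toNat never runs out.
def press_loop (fuel : Nat) (stack : List (Int × Int × Int × String)) (best : Int × String) : Int × String :=
  match fuel, stack with
  | _, [] => best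
  | 0, _ => best   -- unreachable with sufficient fuel
  | f+1, (r, t, c, k) :: rest =>
    if r == 0 then
      press_loop f rest (if t > best.1 then (t, k) else best)
    else
      let rest1 := if 4 ≤ r then (r-4, 2*t, t, k ++ "acvv") :: rest else rest
      let rest2 := if c == 0 then (r-1, t+1, c, k ++ "A") :: rest1
                   else (r-1, t+c, c, k ++ "v") :: rest1
      press_loop f rest2 best

def press_key_alt (remain : Int) (total : Int) (clip : Int) (keylist : String) : Int × String :=
  if remain == 0 then (total, keylist)
  else press_loop (3 ^ remain.toNat) [(remain, total, clip, keylist)] ((0 : Int), "")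

-- ===== PRECONDITION & SPEC =====
-- Pre_ excludes remain < 0, on which A recurses past its base case and raises RecursionError.
def Pre_press_key (remain : Int) (total : Int) (clip : Int) (keylist : String) : Prop := 0 ≤ remain
instance (remain : Int) (total : Int) (clip : Int) (keylist : String) : Decidable (Pre_press_key remain total clip keylist) := by unfold Pre_press_key; infer_instance

def pvWitness_press_key : Int × Int × Int × String := (6, 1, 0, "x")

def Spec_press_key (remain : Int) (total : Int) (clip : Int) (keylist : String) (out : Int × String) : Prop := out = press_key_alt remain total clip keylist
instance (remain : Int) (total : Int) (clip : Int) (keylist : String) (out : Int × String) : Decidable (Spec_press_key remain total clip keylist out) := by unfold Spec_press_key; infer_instance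

-- ===== CLAIM =====
def Claim_equal_press_key : Prop := ∀ (remain : Int) (total : Int) (clip : Int) (keylist : String), Dom_press_key remain total clip keylist → Pre_press_key remain total clip keylist → Spec_press_key remain total clip keylist (press_key remain total clip keylist)

-- ===== LEMMAS AND PROOFS =====

-- shared mathematical value of one subtree (proof-side only)
def pvG (r : Int) (t : Int) (c : Int) (k : String) : Int × String :=
  if h : r ≤ 0 then (t, k)
  else
    let c1 := if c == 0 then pvG (r-1) (t+1) c (k ++ "A") else pvG (r-1) (t+c) c (k ++ "v")
    let a1 := if c1.1 > 0 then c1 else ((0 : Int), "")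
    if 4 ≤ r then
      let c2 := pvG (r-4) (2*t) t (k ++ "acvv")
      if c2.1 > a1.1 then c2 else a1
    else a1
termination_by r.toNat
decreasing_by all_goals omega

def pvStep (a : Int × String) (x : Int × String) : Int × String := if x.1 > a.1 then x else a

-- number of pops the DFS performs for one stack entry with counter r
def pvNodes (r : Int) : Nat :=
  if h : r ≤ 0 then 1
  else 1 + pvNodes (r-1) + (if 4 ≤ r then pvNodes (r-4) else 0)
termination_by r.toNat
decreasing_by all_goals omega

lemma pvNodes_le_pow : ∀ (n : Nat) (r : Int), r.toNat ≤ n → pvNodes r ≤ 3 ^ r.toNat := by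
  intro n
  induction n with
  | zero =>
    intro r h
    rw [pvNodes]
    have : r ≤ 0 := by omega
    simp only [dif_pos this]
    exact Nat.one_le_pow _ _ (by norm_num)
  | succ m ih =>
    intro r h
    rw [pvNodes]
    by_cases h0 : r ≤ 0
    · simp only [dif_pos h0]
      exact Nat.one_le_pow _ _ (by norm_num)
    · rw [dif_neg h0]
      have h1 : pvNodes (r-1) ≤ 3 ^ (r-1).toNat := ih (r-1) (by omega)
      have hmono : 3 ^ (r-1).toNat ≤ 3 ^ (r.toNat - 1) :=
        Nat.pow_le_pow_right (by norm_num) (by omega)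
      have hpow : 3 ^ r.toNat = 3 * 3 ^ (r.toNat - 1) := by
        rw [← pow_succ']
        congr 1
        omega
      have hone : 1 ≤ 3 ^ (r.toNat - 1) := Nat.one_le_pow _ _ (by norm_num)
      by_cases h4 : 4 ≤ r
      · have h2 : pvNodes (r-4) ≤ 3 ^ (r-4).toNat := ih (r-4) (by omega)
        have hmono2 : 3 ^ (r-4).toNat ≤ 3 ^ (r.toNat - 1) :=
          Nat.pow_le_pow_right (by norm_num) (by omega)
        rw [if_pos h4]
        omega
      · rw [if_neg h4]
        omega

-- folding two candidates from a running best equals folding the zero-floored combination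
lemma pvStep_absorb (best G1 G2 : Int × String) (hb : 0 ≤ best.1) :
    pvStep (pvStep best G1) G2
      = pvStep best (pvStep (if G1.1 > 0 then G1 else ((0 : Int), "")) G2) := by
  unfold pvStep
  split_ifs <;> first | rfl | (exfalso; simp_all; omega)

lemma pvStep_absorb_one (best G1 : Int × String) (hb : 0 ≤ best.1) :
    pvStep best G1 = pvStep best (if G1.1 > 0 then G1 else ((0 : Int), "")) := by
  unfold pvStep
  split_ifs <;> first | rfl | (exfalso; simp_all; omega)

-- A's recursion computes pvG
lemma goA_eq (fuel : Nat) : ∀ (r t c : Int) (k : String), 0 ≤ r → r.toNat ≤ fuel →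
    press_key_go fuel r t c k = pvG r t c k := by
  induction fuel with
  | zero =>
    intro r t c k h0 hf
    have hr : r = 0 := by omega
    subst hr
    simp [press_key_go, pvG]
  | succ n ih =>
    intro r t c k h0 hf
    by_cases hr : r = 0
    · subst hr; simp [press_key_go, pvG]
    · have hbeq : (r == 0) = false := by simpa using hr
      have hrle : ¬ r ≤ 0 := by omega
      rw [press_key_go, pvG]
      simp only [hbeq, Bool.false_eq_true, if_false, dif_neg hrle]
      by_cases hc : (c == 0) = true <;> by_cases h4 : 4 ≤ r <;>
        simp only [hc, h4, Bool.false_eq_true, if_true, if_false,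
          List.cons_append, List.nil_append, List.append_nil, List.foldl_cons, List.foldl_nil]
      · rw [ih (r-1) (t+1) c (k ++ "A") (by omega) (by omega),
            ih (r-4) (2*t) t (k ++ "acvv") (by omega) (by omega)]
      · rw [ih (r-1) (t+1) c (k ++ "A") (by omega) (by omega)]
      · rw [ih (r-1) (t+c) c (k ++ "v") (by omega) (by omega),
            ih (r-4) (2*t) t (k ++ "acvv") (by omega) (by omega)]
      · rw [ih (r-1) (t+c) c (k ++ "v") (by omega) (by omega)]

-- B's loop folds pvStep over the subtrees on the stack
lemma loop_eq (F : Nat) : ∀ (fuel : Nat) (r t c : Int) (k : String)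
    (rest : List (Int × Int × Int × String)) (best : Int × String),
    fuel ≤ F → 0 ≤ r → 0 ≤ best.1 → pvNodes r ≤ fuel →
    press_loop fuel ((r, t, c, k) :: rest) best
      = press_loop (fuel - pvNodes r) rest (pvStep best (pvG r t c k)) := by
  induction F with
  | zero =>
    intro fuel r t c k rest best hF h0 hb hn
    have : pvNodes r ≥ 1 := by rw [pvNodes]; split_ifs <;> omega
    omega
  | succ m ih =>
    intro fuel r t c k rest best hF h0 hb hn
    have hn1 : 1 ≤ pvNodes r := by rw [pvNodes]; split_ifs <;> omega
    obtain ⟨f, rfl⟩ : ∃ f, fuel = f + 1 := ⟨fuel - 1, by omega⟩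
    by_cases hr : r = 0
    · subst hr
      have hnr : pvNodes (0 : Int) = 1 := by rw [pvNodes]; simp
      rw [press_loop]
      simp only [BEq.rfl, if_true, hnr]
      have : pvG 0 t c k = (t, k) := by rw [pvG]; simp
      rw [this]
      simp only [Nat.add_sub_cancel]
      rfl
    · have hbeq : (r == 0) = false := by simpa using hr
      have hrle : ¬ r ≤ 0 := by omega
      have hnodes : pvNodes r = 1 + pvNodes (r-1) + (if 4 ≤ r then pvNodes (r-4) else 0) := by
        rw [pvNodes]; rw [dif_neg hrle]
      rw [press_loop]
      simp only [hbeq, Bool.false_eq_true, if_false]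
      by_cases hc : (c == 0) = true <;> by_cases h4 : 4 ≤ r <;>
        simp only [hc, h4, Bool.false_eq_true, if_true, if_false] <;>
        simp only [hc, h4, if_true, Bool.false_eq_true, if_false] at hnodes
      -- clip == 0, both branches
      · rw [ih f (r-1) (t+1) c (k ++ "A") _ best (by omega) (by omega) hb (by omega)]
        rw [ih (f - pvNodes (r-1)) (r-4) (2*t) t (k ++ "acvv") rest _
              (by omega) (by omega) (by unfold pvStep; split_ifs <;> omega) (by omega)]
        rw [pvStep_absorb _ _ _ hb]
        have : pvG r t c k = pvStep (if (pvG (r-1) (t+1) c (k ++ "A")).1 > 0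
            then pvG (r-1) (t+1) c (k ++ "A") else ((0 : Int), ""))
            (pvG (r-4) (2*t) t (k ++ "acvv")) := by
          conv_lhs => rw [pvG]
          simp only [dif_neg hrle, hc, h4, if_true]
          unfold pvStep
          split_ifs <;> first | rfl | omega
        rw [← this]
        congr 1
        omega
      -- clip == 0, single branch
      · rw [ih f (r-1) (t+1) c (k ++ "A") rest best (by omega) (by omega) hb (by omega)]
        rw [pvStep_absorb_one _ _ hb]
        have : pvG r t c k = (if (pvG (r-1) (t+1) c (k ++ "A")).1 > 0
            then pvG (r-1) (t+1) c (k ++ "A") else ((0 : Int), "")) := by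
          conv_lhs => rw [pvG]
          simp only [dif_neg hrle, hc, h4, if_true, if_false]
        rw [← this]
        congr 1
        omega
      -- clip ≠ 0, both branches
      · rw [ih f (r-1) (t+c) c (k ++ "v") _ best (by omega) (by omega) hb (by omega)]
        rw [ih (f - pvNodes (r-1)) (r-4) (2*t) t (k ++ "acvv") rest _
              (by omega) (by omega) (by unfold pvStep; split_ifs <;> omega) (by omega)]
        rw [pvStep_absorb _ _ _ hb]
        have : pvG r t c k = pvStep (if (pvG (r-1) (t+c) c (k ++ "v")).1 > 0
            then pvG (r-1) (t+c) c (k ++ "v") else ((0 : Int), ""))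
            (pvG (r-4) (2*t) t (k ++ "acvv")) := by
          conv_lhs => rw [pvG]
          simp only [dif_neg hrle, hc, h4, Bool.false_eq_true, if_false, if_true]
          unfold pvStep
          split_ifs <;> first | rfl | omega
        rw [← this]
        congr 1
        omega
      -- clip ≠ 0, single branch
      · rw [ih f (r-1) (t+c) c (k ++ "v") rest best (by omega) (by omega) hb (by omega)]
        rw [pvStep_absorb_one _ _ hb]
        have : pvG r t c k = (if (pvG (r-1) (t+c) c (k ++ "v")).1 > 0
            then pvG (r-1) (t+c) c (k ++ "v") else ((0 : Int), "")) := by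
          conv_lhs => rw [pvG]
          simp only [dif_neg hrle, hc, h4, Bool.false_eq_true, if_false]
        rw [← this]
        congr 1
        omega

-- for 1 ≤ r the zero floor is already inside pvG
lemma pvG_floor (r t c : Int) (k : String) (hr : ¬ r ≤ 0) :
    pvStep ((0 : Int), "") (pvG r t c k) = pvG r t c k := by
  rw [pvG]
  simp only [dif_neg hr]
  by_cases h4 : 4 ≤ r <;> simp only [h4, if_true, if_false] <;>
    generalize (if (c == 0) = true then pvG (r-1) (t+1) c (k ++ "A")
      else pvG (r-1) (t+c) c (k ++ "v")) = x
  · generalize pvG (r-4) (2*t) t (k ++ "acvv") = y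
    unfold pvStep
    split_ifs <;> first | rfl | (exfalso; simp_all; omega)
  · unfold pvStep
    split_ifs <;> first | rfl | (exfalso; simp_all; omega)

-- ===== VERDICT =====
theorem press_key_spec : Claim_equal_press_key := by
  intro remain total clip keylist _ hpre
  have hp : (0 : Int) ≤ remain := hpre
  unfold Spec_press_key press_key press_key_alt
  by_cases h0 : remain = 0
  · subst h0; simp [press_key_go]
  · have hbeq : (remain == 0) = false := by simpa using h0
    simp only [hbeq, Bool.false_eq_true, if_false]
    rw [goA_eq remain.toNat remain total clip keylist hp (le_refl _)]
    rw [loop_eq (3 ^ remain.toNat) (3 ^ remain.toNat) remain total clip keylist [] ((0:Int), "")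
          (le_refl _) hp (by norm_num) (pvNodes_le_pow remain.toNat remain (le_refl _))]
    rw [press_loop]
    exact (pvG_floor remain total clip keylist (by omega)).symm
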